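-- pv_equiv track=rewrite | github.com/BAMDH/Cosas_Uni | Taller programación/Proyecto/Imagen/Quick_Sort_Matriz.py | conse_elemento
-- ===== SOURCE A (Python) =====
-- def conse_elemento(lista,columna,ventana,contador):
--     """
--     Se define una función que consigue los elementos de la ventana
--     se crea una variable nueva_posicion que contenga los elementos de la nueva
--     posición
--     """
--     if contador== ventana:
--         return []
--     else:
--         nueva_posicion=columna-ventana+contador+1
--         if nueva_posicion<0 or nueva_posicion>=len(lista):
--             return conse_elemento(lista,columna, ventana, contador+1)
--         else:
--             nuevo_elemento=lista[nueva_posicion]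
--             return [nuevo_elemento]+conse_elemento(lista,columna, ventana, contador+1)
-- ===== SOURCE B (Python) =====
-- def conse_elemento(lista, columna, ventana, contador):
--     """Iterative rewrite: one loop over range(contador, ventana), appending
--     in-range window elements; same order and same handling of contador."""
--     resultado = []
--     for c in range(contador, ventana):
--         pos = columna - ventana + c + 1
--         if 0 <= pos < len(lista):
--             resultado.append(lista[pos])
--     return resultado
-- ===== Notes on version B (the rewrite author's own statement) =====
-- stated objective: simpler
-- what changed: Replaces A's recursion (one call frame per window slot, list concatenations [x]+rest) with a single flat loop over range(contador, ventana) appending into one accumulator list.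
import Mathlib
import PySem

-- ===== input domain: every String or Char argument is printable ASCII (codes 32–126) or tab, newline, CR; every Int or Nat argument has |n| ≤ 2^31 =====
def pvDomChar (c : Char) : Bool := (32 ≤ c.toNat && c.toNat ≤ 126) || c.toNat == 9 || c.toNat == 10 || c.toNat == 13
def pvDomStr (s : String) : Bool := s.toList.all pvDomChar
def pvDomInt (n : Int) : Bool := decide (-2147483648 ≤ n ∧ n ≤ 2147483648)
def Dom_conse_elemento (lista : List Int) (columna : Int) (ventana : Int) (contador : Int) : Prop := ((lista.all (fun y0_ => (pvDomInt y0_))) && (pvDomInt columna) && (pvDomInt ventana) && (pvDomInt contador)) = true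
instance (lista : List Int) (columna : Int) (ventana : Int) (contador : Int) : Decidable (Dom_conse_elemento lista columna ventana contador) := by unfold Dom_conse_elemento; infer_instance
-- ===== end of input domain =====

-- B replaces A's recursion (one call frame and a list concatenation per window slot)
-- with a single flat loop over range(contador, ventana); exact same result order.

-- ===== PORT A =====
-- A recurses on contador until it equals ventana; in Lean the recursion runs on the
-- fuel (ventana - contador).toNat, which is exactly the number of remaining steps
-- whenever contador ≤ ventana (guaranteed by Pre_; A diverges/overflows otherwise).
def conseGoA (lista : List Int) (columna ventana : Int) (contador : Int) (fuel : Nat) : List Int :=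
  if contador = ventana then []
  else
    match fuel with
    | 0 => []  -- unreachable under Pre_ (contador ≤ ventana)
    | n + 1 =>
      let nueva_posicion := columna - ventana + contador + 1
      if nueva_posicion < 0 ∨ nueva_posicion ≥ (lista.length : Int) then
        conseGoA lista columna ventana (contador + 1) n
      else
        -- lista[nueva_posicion]: guarded 0 ≤ idx < len, so pyGet? is some; getD 0 unreachable
        ((PySem.List.pyGet? lista nueva_posicion).getD 0)
          :: conseGoA lista columna ventana (contador + 1) n

def conse_elemento (lista : List Int) (columna : Int) (ventana : Int) (contador : Int) : List Int :=
  conseGoA lista columna ventana contador ((ventana - contador).toNat)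

-- ===== PORT B =====
def conse_elemento_alt (lista : List Int) (columna : Int) (ventana : Int) (contador : Int) : List Int :=
  (PySem.List.pyRange contador ventana).foldl
    (fun resultado c =>
      let pos := columna - ventana + c + 1
      if 0 ≤ pos ∧ pos < (lista.length : Int) then
        resultado ++ [(PySem.List.pyGet? lista pos).getD 0]
      else resultado)
    []

-- ===== PRECONDITION & SPEC =====
-- Pre_ excludes inputs where Python A raises: contador > ventana never reaches the base
-- case (infinite recursion → RecursionError), and a window deeper than CPython's default
-- recursion limit (one frame per step; limit 1000, we use 900 as a safe bound) also
-- raises RecursionError. A returns normally exactly on windows within that depth.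
def Pre_conse_elemento (lista : List Int) (columna : Int) (ventana : Int) (contador : Int) : Prop :=
  contador ≤ ventana ∧ ventana - contador ≤ 900
instance (lista : List Int) (columna : Int) (ventana : Int) (contador : Int) : Decidable (Pre_conse_elemento lista columna ventana contador) := by unfold Pre_conse_elemento; infer_instance

def pvWitness_conse_elemento : List Int × Int × Int × Int := ([4, 7, 9], 1, 2, 0)

def Spec_conse_elemento (lista : List Int) (columna : Int) (ventana : Int) (contador : Int) (out : List Int) : Prop := out = conse_elemento_alt lista columna ventana contador
instance (lista : List Int) (columna : Int) (ventana : Int) (contador : Int) (out : List Int) : Decidable (Spec_conse_elemento lista columna ventana contador out) := by unfold Spec_conse_elemento; infer_instance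

-- ===== CLAIM (what is proved, stated in full; the proofs are below) =====
def Claim_equal_conse_elemento : Prop := ∀ (lista : List Int) (columna : Int) (ventana : Int) (contador : Int), Dom_conse_elemento lista columna ventana contador → Pre_conse_elemento lista columna ventana contador → Spec_conse_elemento lista columna ventana contador (conse_elemento lista columna ventana contador)

-- ===== LEMMAS AND PROOFS =====

-- B's foldl in filter/map form (via the library loop-shape lemma foldl_append_if).
theorem alt_eq_filter_map (lista : List Int) (columna ventana contador : Int) :
    conse_elemento_alt lista columna ventana contador =
      ((PySem.List.pyRange contador ventana).filter
          (fun c => decide (0 ≤ columna - ventana + c + 1 ∧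
                            columna - ventana + c + 1 < (lista.length : Int)))).map
        (fun c => (PySem.List.pyGet? lista (columna - ventana + c + 1)).getD 0) := by
  unfold conse_elemento_alt
  have h := PySem.List.foldl_append_if
    (fun c : Int => decide (0 ≤ columna - ventana + c + 1 ∧
                            columna - ventana + c + 1 < (lista.length : Int)))
    (fun c : Int => (PySem.List.pyGet? lista (columna - ventana + c + 1)).getD 0)
    (PySem.List.pyRange contador ventana) []
  simp only [decide_eq_true_eq] at h
  simpa using h

-- A's recursion computes the same filter/map, by induction on the fuel.
theorem goA_eq (lista : List Int) (columna ventana : Int) :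
    ∀ (n : Nat) (contador : Int), contador ≤ ventana → (ventana - contador).toNat = n →
      conseGoA lista columna ventana contador n =
        ((PySem.List.pyRange contador ventana).filter
            (fun c => decide (0 ≤ columna - ventana + c + 1 ∧
                              columna - ventana + c + 1 < (lista.length : Int)))).map
          (fun c => (PySem.List.pyGet? lista (columna - ventana + c + 1)).getD 0) := by
  intro n
  induction n with
  | zero =>
    intro contador hle hfuel
    have : contador = ventana := by omega
    subst this
    rw [PySem.List.pyRange_one_eq_nil le_rfl]
    simp [conseGoA]
  | succ n ih =>
    intro contador hle hfuel
    have hlt : contador < ventana := by omega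
    rw [PySem.List.pyRange_one_cons hlt]
    have hrec := ih (contador + 1) (by omega) (by omega)
    unfold conseGoA
    rw [if_neg (by omega)]
    simp only [List.filter_cons, List.map_cons]
    by_cases hpos : columna - ventana + contador + 1 < 0 ∨
        columna - ventana + contador + 1 ≥ (lista.length : Int)
    · rw [if_pos hpos, hrec]
      have : ¬ (0 ≤ columna - ventana + contador + 1 ∧
                columna - ventana + contador + 1 < (lista.length : Int)) := by omega
      simp [this]
    · rw [if_neg hpos, hrec]
      have : (0 ≤ columna - ventana + contador + 1 ∧
              columna - ventana + contador + 1 < (lista.length : Int)) := by omega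
      simp [this]

-- ===== VERDICT (by name: the statement is the Claim_ definition above) =====
theorem conse_elemento_spec : Claim_equal_conse_elemento := by
  intro lista columna ventana contador _ hpre
  unfold Spec_conse_elemento conse_elemento
  rw [goA_eq lista columna ventana _ contador hpre.1 rfl, alt_eq_filter_map]
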